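-- pv_equiv track=rewrite | github.com/fshowalter/movielog | movielog/internal/movie_searcher.py | _hash_rows_by_title_id
-- ===== SOURCE A (Python) =====
-- from typing import Any, Dict, List
--
-- def _hash_rows_by_title_id(rows: List[Any]) -> Dict[str, List[str]]:
--     results_hash: Dict[str, List[str]] = {}
--
--     for row in rows:
--         title_id = row["imdb_id"]
--         if results_hash.get(title_id) is None:
--             results_hash[title_id] = []
--         results_hash[title_id].append(row["full_name"])
--
--     return results_hash
-- ===== SOURCE B (Python) =====
-- from typing import Any, Dict, List
--
--
-- def _hash_rows_by_title_id(rows: List[Any]) -> Dict[str, List[str]]: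
--     # Two-phase decomposition: first the distinct title ids in first-seen order,
--     # then one comprehension per id collecting its full_names.
--     keys = list(dict.fromkeys(row["imdb_id"] for row in rows))
--     return {
--         title_id: [row["full_name"] for row in rows if row["imdb_id"] == title_id]
--         for title_id in keys
--     }
-- ===== Notes on version B (the rewrite author's own statement) =====
-- stated objective: alternative
-- what changed: Replaced the single-pass mutable-dict grouping (check-insert-append per row) by a two-phase decomposition: dedupe the imdb_ids once, then build each group with a filtering comprehension over the rows.
import Mathlib
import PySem

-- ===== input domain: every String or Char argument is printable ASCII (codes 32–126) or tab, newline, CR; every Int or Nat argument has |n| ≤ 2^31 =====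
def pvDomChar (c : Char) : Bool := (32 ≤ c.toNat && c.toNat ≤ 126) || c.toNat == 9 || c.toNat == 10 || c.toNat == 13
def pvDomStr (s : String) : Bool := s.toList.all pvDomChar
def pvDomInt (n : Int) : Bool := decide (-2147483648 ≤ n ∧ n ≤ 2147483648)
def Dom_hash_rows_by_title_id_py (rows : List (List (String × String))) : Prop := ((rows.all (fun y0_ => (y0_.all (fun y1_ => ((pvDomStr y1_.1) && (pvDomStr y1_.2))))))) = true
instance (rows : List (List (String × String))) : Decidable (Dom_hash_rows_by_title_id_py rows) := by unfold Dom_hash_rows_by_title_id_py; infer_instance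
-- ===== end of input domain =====

-- B replaces A's single-pass mutable-dict grouping by a two-phase dedup-then-filter decomposition (same result, not faster).


-- ===== PORT A =====
-- A: one pass; for each row, ensure the key maps to a list, then append the full_name.
def hash_rows_by_title_id_py (rows : List (List (String × String))) : List (String × List String) :=
  (rows.foldl (fun results_hash row =>
      let title_id := ((PySem.Dict.mk row).get? "imdb_id").getD ""
      let h1 := if (results_hash.get? title_id) = none
                then results_hash.insert title_id []
                else results_hash
      h1.modify title_id [] (fun l => l ++ [((PySem.Dict.mk row).get? "full_name").getD ""]))
    PySem.Dict.empty).items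

-- ===== PORT B =====
-- B: dedupe the imdb_ids, then one filtering pass per distinct id.
def hash_rows_by_title_id_py_alt (rows : List (List (String × String))) : List (String × List String) :=
  let keys := PySem.List.dedup (rows.map (fun row => ((PySem.Dict.mk row).get? "imdb_id").getD ""))
  keys.map (fun title_id =>
    (title_id,
     (rows.filter (fun row => ((PySem.Dict.mk row).get? "imdb_id").getD "" == title_id)).map
       (fun row => ((PySem.Dict.mk row).get? "full_name").getD "")))

-- ===== PRECONDITION & SPEC =====
-- Pre_: every row must contain both keys "imdb_id" and "full_name"; otherwise Python A raises KeyError.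
def Pre_hash_rows_by_title_id_py (rows : List (List (String × String))) : Prop :=
  (rows.all (fun row => (PySem.Dict.mk row).contains "imdb_id" && (PySem.Dict.mk row).contains "full_name")) = true
instance (rows : List (List (String × String))) : Decidable (Pre_hash_rows_by_title_id_py rows) := by unfold Pre_hash_rows_by_title_id_py; infer_instance
def pvWitness_hash_rows_by_title_id_py : (List (List (String × String))) :=
  [[("imdb_id", "tt0111161"), ("full_name", "Frank Darabont")],
   [("imdb_id", "tt0111161"), ("full_name", "Tim Robbins")]]

def Spec_hash_rows_by_title_id_py (rows : List (List (String × String))) (out : List (String × List String)) : Prop := out = hash_rows_by_title_id_py_alt rows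
instance (rows : List (List (String × String))) (out : List (String × List String)) : Decidable (Spec_hash_rows_by_title_id_py rows out) := by unfold Spec_hash_rows_by_title_id_py; infer_instance

-- ===== CLAIM (what is proved, stated in full; the proofs are below) =====
def Claim_equal_hash_rows_by_title_id_py : Prop := ∀ (rows : List (List (String × String))), Dom_hash_rows_by_title_id_py rows → Pre_hash_rows_by_title_id_py rows → Spec_hash_rows_by_title_id_py rows (hash_rows_by_title_id_py rows)

-- ===== LEMMAS AND PROOFS =====

-- A's "ensure key, then append" step is exactly a Dict.modify.
theorem stepA_eq_modify (h : PySem.Dict String (List String)) (t : String) (w : String) :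
    (if (h.get? t) = none then h.insert t [] else h).modify t [] (fun l => l ++ [w])
      = h.modify t [] (fun l => l ++ [w]) := by
  by_cases hc : h.get? t = none
  · simp only [hc, if_pos, PySem.Dict.modify, PySem.Dict.getD_insert_self,
      PySem.Dict.insert_insert_self]
    simp [PySem.Dict.getD_eq_get?_getD, hc]
  · simp [hc]

theorem hash_rows_by_title_id_eq (rows : List (List (String × String))) :
    hash_rows_by_title_id_py rows = hash_rows_by_title_id_py_alt rows := by
  have hstep : hash_rows_by_title_id_py rows
      = ((rows.map (fun row => (((PySem.Dict.mk row).get? "imdb_id").getD "",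
                                ((PySem.Dict.mk row).get? "full_name").getD ""))).foldl
          (fun d p => d.modify p.1 [] (fun l => l ++ [p.2])) PySem.Dict.empty).items := by
    unfold hash_rows_by_title_id_py
    rw [List.foldl_map]
    congr 1
    apply PySem.List.foldl_congr_mem
    intro d row _
    exact stepA_eq_modify d _ _
  set pairs := rows.map (fun row => (((PySem.Dict.mk row).get? "imdb_id").getD "",
                                     ((PySem.Dict.mk row).get? "full_name").getD "")) with hpairs
  set d := pairs.foldl (fun d p => d.modify p.1 [] (fun l => l ++ [p.2])) PySem.Dict.empty with hd
  have hnd : d.keys.Nodup := by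
    rw [hd]
    exact PySem.Dict.nodup_keys_foldl_modify_key pairs Prod.fst []
      (fun d p => (fun l => l ++ [p.2])) PySem.Dict.empty (by simp)
  have hkeys : d.keys = PySem.List.dedup (rows.map (fun row => ((PySem.Dict.mk row).get? "imdb_id").getD "")) := by
    rw [hd, PySem.Dict.keys_foldl_modify_key]
    simp [hpairs, PySem.Set.update, PySem.Dict.keys_empty, ← PySem.Set.ofList_eq_foldl,
      List.map_map, Function.comp_def]
  have hget : ∀ t, d.getD t [] = (pairs.filter (fun p => p.1 == t)).map (·.2) := by
    intro t
    rw [hd, PySem.Dict.getD_foldl_modify_append]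
    simp [PySem.Dict.getD_empty]
  rw [hstep, PySem.Dict.items_eq_map_keys d hnd [], hkeys]
  unfold hash_rows_by_title_id_py_alt
  apply List.map_congr_left
  intro t _
  rw [hget t]
  simp [hpairs, List.filter_map, List.map_map, Function.comp_def]

-- ===== VERDICT (by name: the statement is the Claim_ definition above) =====
theorem hash_rows_by_title_id_py_spec : Claim_equal_hash_rows_by_title_id_py := by
  intro rows _ _
  exact hash_rows_by_title_id_eq rows
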